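-- pv_equiv track=rewrite | github.com/saymololy/bytebase | vendor/github.com/bytebase/google-sql-parser/fetch_test.py | extract_valid_statement_from_block
-- ===== SOURCE A (Python) =====
-- def extract_valid_statement_from_block(block: str) -> str:
--     if "ERROR" in block:
--         return ""
--     # skip the empty line, and read reversely until meet '--'
--     lines = block.split("\n")
--     valid_statement_lines = []
--     for line in reversed(lines):
--         if line == "":
--             continue
--         if line == "--":
--             break
--         if line != "":
--             valid_statement_lines.append(line)
--     return "\n".join(reversed(valid_statement_lines))
-- ===== SOURCE B (Python) =====
-- def extract_valid_statement_from_block(block: str) -> str: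
--     if "ERROR" in block:
--         return ""
--     lines = block.split("\n")
--     # find the index of the last line that is exactly '--' (-1 when absent)
--     idx = -1
--     for i, line in enumerate(lines):
--         if line == "--":
--             idx = i
--     return "\n".join(line for line in lines[idx + 1:] if line != "")
-- ===== Notes on version B (the rewrite author's own statement) =====
-- stated objective: alternative
-- what changed: Instead of iterating over the lines in reverse with a break at '--' and reversing the collected result, B first computes the index of the last line equal to '--' in one forward scan (-1 when absent), then slices the tail lines[idx+1:], filters out empty lines forward, and joins.
import Mathlib
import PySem

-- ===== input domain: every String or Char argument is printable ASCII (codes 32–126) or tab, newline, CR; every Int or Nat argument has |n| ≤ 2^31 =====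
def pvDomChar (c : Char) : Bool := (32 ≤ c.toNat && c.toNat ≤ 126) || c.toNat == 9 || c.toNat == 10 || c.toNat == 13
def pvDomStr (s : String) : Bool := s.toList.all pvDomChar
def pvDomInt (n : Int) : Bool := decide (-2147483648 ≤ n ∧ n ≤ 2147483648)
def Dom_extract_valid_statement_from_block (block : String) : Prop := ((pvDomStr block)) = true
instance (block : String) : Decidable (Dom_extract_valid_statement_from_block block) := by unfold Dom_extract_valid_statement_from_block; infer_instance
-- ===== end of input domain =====

-- B computes the boundary (index of the last '--' line) in one forward pass and then
-- slices/filters/joins forward, instead of A's reversed iteration with break and a final re-reversal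
-- (objective: simpler/alternative decomposition; same O(n) cost).

-- ===== PORT A =====
-- A's reversed loop: accumulator valid_statement_lines; break at '--' returns the accumulator.
def pvALoop : List String → List String → List String
  | acc, [] => acc
  | acc, l :: rest =>
    if l = "" then pvALoop acc rest
    else if l = "--" then acc
    else if l ≠ "" then pvALoop (acc ++ [l]) rest
    else pvALoop acc rest

def extract_valid_statement_from_block (block : String) : String :=
  if PySem.Str.isIn "ERROR" block then ""
  else
    let lines := (PySem.Str.split? block "\n").getD []
    PySem.Str.join "\n" (pvALoop [] lines.reverse).reverse

-- ===== PORT B =====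
-- B's forward scan recording the index of the last line equal to '--' (-1 when absent).
def pvLastIdx : Int → Nat → List String → Int
  | idx, _, [] => idx
  | idx, i, l :: rest => pvLastIdx (if l = "--" then (i : Int) else idx) (i + 1) rest

def extract_valid_statement_from_block_alt (block : String) : String :=
  if PySem.Str.isIn "ERROR" block then ""
  else
    let lines := (PySem.Str.split? block "\n").getD []
    let idx := pvLastIdx (-1) 0 lines
    PySem.Str.join "\n" ((PySem.List.slice lines (some (idx + 1)) none).filter (fun l => l ≠ ""))

-- ===== PRECONDITION & SPEC =====
def Spec_extract_valid_statement_from_block (block : String) (out : String) : Prop := out = extract_valid_statement_from_block_alt block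
instance (block : String) (out : String) : Decidable (Spec_extract_valid_statement_from_block block out) := by unfold Spec_extract_valid_statement_from_block; infer_instance

-- ===== CLAIM (what is proved, stated in full; the proofs are below) =====
def Claim_equal_extract_valid_statement_from_block : Prop := ∀ (block : String), Dom_extract_valid_statement_from_block block → Spec_extract_valid_statement_from_block block (extract_valid_statement_from_block block)

-- ===== LEMMAS AND PROOFS =====

-- A's loop with a nonempty accumulator prefixes the empty-accumulator result.
theorem pvALoop_acc (rs : List String) : ∀ acc, pvALoop acc rs = acc ++ pvALoop [] rs := by
  induction rs with
  | nil => intro acc; simp [pvALoop]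
  | cons l rest ih =>
    intro acc
    by_cases h0 : l = ""
    · simpa [pvALoop, h0] using ih acc
    · by_cases h1 : l = "--"
      · simp [pvALoop, h1]
      · simp only [pvALoop, h0, h1, if_neg, ne_eq, not_false_eq_true, ite_true]
        rw [ih (acc ++ [l]), ih ([] ++ [l])]
        simp

-- closed form of A's loop: take until the first '--', dropping empty lines.
theorem pvALoop_eq (rs : List String) :
    pvALoop [] rs = (rs.takeWhile (fun l => l ≠ "--")).filter (fun l => l ≠ "") := by
  induction rs with
  | nil => rfl
  | cons l rest ih =>
    by_cases h1 : l = "--"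
    · simp [pvALoop, h1, List.takeWhile]
    · by_cases h0 : l = ""
      · simp [pvALoop, h0, List.takeWhile, ih]
      · rw [show pvALoop [] (l :: rest) = pvALoop [l] rest by simp [pvALoop, h0, h1],
          pvALoop_acc]
        simp [List.takeWhile, h0, h1, ih]

theorem pvLastIdx_append (ys : List String) (x : String) : ∀ (idx : Int) (i : Nat),
    pvLastIdx idx i (ys ++ [x]) =
      if x = "--" then ((i + ys.length : Nat) : Int) else pvLastIdx idx i ys := by
  induction ys with
  | nil => intro idx i; by_cases h : x = "--" <;> simp [pvLastIdx, h]
  | cons l rest ih =>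
    intro idx i
    simp only [List.cons_append, pvLastIdx, ih]
    by_cases h : x = "--" <;> simp [h]; ring_nf

theorem pvLastIdx_lt (rs : List String) : ∀ (idx : Int) (i : Nat), idx < i →
    pvLastIdx idx i rs < (i : Int) + rs.length := by
  induction rs with
  | nil => intro idx i h; simpa [pvLastIdx] using lt_of_lt_of_le h (by simp)
  | cons l rest ih =>
    intro idx i h
    simp only [pvLastIdx, List.length_cons]
    have := ih (if l = "--" then (i : Int) else idx) (i + 1)
      (by split <;> [push_cast; skip] <;> omega)
    push_cast at this ⊢
    omega

-- the boundary index computed by B cuts exactly where A's reversed break cuts.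
theorem drop_lastIdx (lines : List String) :
    lines.drop (pvLastIdx (-1) 0 lines + 1).toNat =
      (lines.reverse.takeWhile (fun l => l ≠ "--")).reverse := by
  induction lines using List.reverseRecOn with
  | nil => rfl
  | append_singleton ys x ih =>
    rw [pvLastIdx_append]
    by_cases h : x = "--"
    · rw [if_pos h]
      have : ((((0 + ys.length : Nat) : Int) + 1)).toNat = ys.length + 1 := by push_cast; omega
      rw [this]
      have hdrop : List.drop (ys.length + 1) (ys ++ [x]) = [] := by
        apply List.drop_eq_nil_of_le; simp
      rw [hdrop]
      simp [h]
    · rw [if_neg h]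
      have hlt : pvLastIdx (-1) 0 ys < (ys.length : Int) := by
        simpa using pvLastIdx_lt ys (-1) 0 (by norm_num)
      have hnat : (pvLastIdx (-1) 0 ys + 1).toNat ≤ ys.length := by omega
      rw [List.drop_append_of_le_length hnat, ih]
      simp [h]

theorem pvLastIdx_ge (rs : List String) : ∀ (idx : Int) (i : Nat), -1 ≤ idx →
    -1 ≤ pvLastIdx idx i rs := by
  induction rs with
  | nil => intro idx i h; simpa [pvLastIdx] using h
  | cons l rest ih =>
    intro idx i h
    exact ih _ _ (by split <;> omega)

-- ===== VERDICT (by name: the statement is the Claim_ definition above) =====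
theorem extract_valid_statement_from_block_spec : Claim_equal_extract_valid_statement_from_block := by
  intro block _
  unfold Spec_extract_valid_statement_from_block
  unfold extract_valid_statement_from_block extract_valid_statement_from_block_alt
  split
  next => rfl
  next =>
    set lines := (PySem.Str.split? block "\n").getD [] with hl
    show PySem.Str.join "\n" (pvALoop [] lines.reverse).reverse =
      PySem.Str.join "\n"
        ((PySem.List.slice lines (some (pvLastIdx (-1) 0 lines + 1)) none).filter
          (fun l => l ≠ ""))
    congr 1
    have h1 : (-1 : Int) ≤ pvLastIdx (-1) 0 lines := pvLastIdx_ge lines (-1) 0 (by norm_num)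
    have hcast : pvLastIdx (-1) 0 lines + 1 = (((pvLastIdx (-1) 0 lines + 1).toNat : Nat) : Int) := by
      omega
    rw [hcast, PySem.List.slice_from_natCast, drop_lastIdx, pvALoop_eq, ← List.filter_reverse]
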